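-- pv_equiv track=rewrite | github.com/SelianU/codetree-TILs | 250323/3개의 선 2/three-lines-2.py | choose_3_and_delete_row
-- ===== SOURCE A (Python) =====
-- def choose_3_and_delete_row(p_y, points):
--     for i_idx, first in enumerate(p_y):
--         for j_idx, second in enumerate(p_y):
--             for k_idx, third in enumerate(p_y):
--                 # p에 있는 거 제외하고 남은거 묶어서 리스트로 만들어
--                 p = [point for point in points if point[1] != first and point[1] != second and point[1] != third]
--                 if not p:
--                     continue
--                 else:
--                     return True
--     return False
-- ===== SOURCE B (Python) =====
-- def choose_3_and_delete_row(p_y, points):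
--     if not p_y or not points:
--         return False
--     w = p_y[0]
--     if any(y != w for y in p_y):
--         return True
--     return any(pt[1] != w for pt in points)
-- ===== Notes on version B (the rewrite author's own statement) =====
-- stated objective: faster
-- what changed: Replaces A's triple-nested scan over p_y with per-triple list filtering by a linear case analysis: if p_y has two distinct values any point survives some all-equal triple, otherwise just check whether some point's y differs from the single value.
import Mathlib
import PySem

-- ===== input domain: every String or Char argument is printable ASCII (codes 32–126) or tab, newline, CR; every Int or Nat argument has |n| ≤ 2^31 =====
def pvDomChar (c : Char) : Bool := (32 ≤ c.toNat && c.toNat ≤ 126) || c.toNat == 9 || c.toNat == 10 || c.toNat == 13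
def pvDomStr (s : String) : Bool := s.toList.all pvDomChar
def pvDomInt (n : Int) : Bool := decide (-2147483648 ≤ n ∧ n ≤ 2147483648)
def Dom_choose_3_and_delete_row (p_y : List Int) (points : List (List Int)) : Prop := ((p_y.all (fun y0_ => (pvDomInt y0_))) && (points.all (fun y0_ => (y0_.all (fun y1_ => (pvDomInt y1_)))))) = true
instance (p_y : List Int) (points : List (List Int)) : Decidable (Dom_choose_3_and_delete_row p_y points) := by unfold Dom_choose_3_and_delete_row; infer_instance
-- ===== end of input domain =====

-- B replaces A's triple-nested brute force with a linear case analysis on whether p_y holds two distinct values: asymptotically faster.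

-- ===== PORT A =====
-- point[1]; under Pre_ every point has length ≥ 2, so the default is never used
def pvY (pt : List Int) : Int := (PySem.List.pyGet? pt 1).getD 0

-- the filtered list p of one loop body
def pvFilter (first second third : Int) (points : List (List Int)) : List (List Int) :=
  points.filter (fun point => pvY point ≠ first && pvY point ≠ second && pvY point ≠ third)

-- innermost 'for k_idx, third in enumerate(p_y)' with early return
def pvLoop3 (first second : Int) (ks : List Int) (points : List (List Int)) : Bool :=
  match ks with
  | [] => false
  | third :: t => if (pvFilter first second third points).isEmpty then pvLoop3 first second t points else true

def pvLoop2 (first : Int) (js ks : List Int) (points : List (List Int)) : Bool :=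
  match js with
  | [] => false
  | second :: t => if pvLoop3 first second ks points then true else pvLoop2 first t ks points

def pvLoop1 (is js ks : List Int) (points : List (List Int)) : Bool :=
  match is with
  | [] => false
  | first :: t => if pvLoop2 first js ks points then true else pvLoop1 t js ks points

def choose_3_and_delete_row (p_y : List Int) (points : List (List Int)) : Bool :=
  pvLoop1 p_y p_y p_y points

-- ===== PORT B =====
def choose_3_and_delete_row_alt (p_y : List Int) (points : List (List Int)) : Bool :=
  if p_y.isEmpty || points.isEmpty then false
  else
    let w := (PySem.List.pyGet? p_y 0).getD 0
    if p_y.any (fun y => y ≠ w) then true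
    else points.any (fun pt => pvY pt ≠ w)

-- ===== PRECONDITION & SPEC =====
-- A raises IndexError (point[1]) whenever p_y is nonempty and some point has fewer than 2 coordinates;
-- exactly those inputs are excluded.
def Pre_choose_3_and_delete_row (p_y : List Int) (points : List (List Int)) : Prop :=
  p_y = [] ∨ ∀ pt ∈ points, 2 ≤ pt.length
instance (p_y : List Int) (points : List (List Int)) : Decidable (Pre_choose_3_and_delete_row p_y points) := by unfold Pre_choose_3_and_delete_row; infer_instance

def pvWitness_choose_3_and_delete_row : List Int × List (List Int) := ([1, 2], [[0, 3], [4, 1]])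

def Spec_choose_3_and_delete_row (p_y : List Int) (points : List (List Int)) (out : Bool) : Prop := out = choose_3_and_delete_row_alt p_y points
instance (p_y : List Int) (points : List (List Int)) (out : Bool) : Decidable (Spec_choose_3_and_delete_row p_y points out) := by unfold Spec_choose_3_and_delete_row; infer_instance

-- ===== CLAIM (what is proved, stated in full; the proofs are below) =====
def Claim_equal_choose_3_and_delete_row : Prop := ∀ (p_y : List Int) (points : List (List Int)), Dom_choose_3_and_delete_row p_y points → Pre_choose_3_and_delete_row p_y points → Spec_choose_3_and_delete_row p_y points (choose_3_and_delete_row p_y points)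

-- ===== LEMMAS AND PROOFS =====

-- characterisations of the three loops as existentials
theorem pvLoop3_eq_true (first second : Int) (ks : List Int) (points : List (List Int)) :
    pvLoop3 first second ks points = true ↔
      ∃ c ∈ ks, ∃ pt ∈ points, pvY pt ≠ first ∧ pvY pt ≠ second ∧ pvY pt ≠ c := by
  induction ks with
  | nil => simp [pvLoop3]
  | cons third t ih =>
    simp only [pvLoop3]
    by_cases h : (pvFilter first second third points).isEmpty
    · simp only [h, if_true, ih]
      rw [List.isEmpty_iff] at h
      constructor
      · rintro ⟨c, hc, pt, hpt, h1, h2, h3⟩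
        exact ⟨c, List.mem_cons_of_mem _ hc, pt, hpt, h1, h2, h3⟩
      · rintro ⟨c, hc, pt, hpt, h1, h2, h3⟩
        rcases List.mem_cons.mp hc with rfl | hc
        · exfalso
          have : pt ∈ pvFilter first second c points := by
            simp [pvFilter, List.mem_filter, hpt, h1, h2, h3]
          simp [h] at this
        · exact ⟨c, hc, pt, hpt, h1, h2, h3⟩
    · simp only [h]
      rw [List.isEmpty_iff] at h
      rcases List.exists_mem_of_ne_nil _ h with ⟨pt, hpt⟩
      have := List.mem_filter.mp hpt
      simp only [decide_not, Bool.and_eq_true, Bool.not_eq_true',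
        decide_eq_false_iff_not] at this
      constructor
      · intro _; exact ⟨third, List.mem_cons_self, pt, this.1, this.2.1.1, this.2.1.2, this.2.2⟩
      · intro _; rfl

theorem pvLoop2_eq_true (first : Int) (js ks : List Int) (points : List (List Int)) :
    pvLoop2 first js ks points = true ↔
      ∃ b ∈ js, pvLoop3 first b ks points = true := by
  induction js with
  | nil => simp [pvLoop2]
  | cons second t ih =>
    simp only [pvLoop2]
    by_cases h : pvLoop3 first second ks points <;> simp [h, ih]

theorem pvLoop1_eq_true (is js ks : List Int) (points : List (List Int)) :
    pvLoop1 is js ks points = true ↔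
      ∃ a ∈ is, pvLoop2 a js ks points = true := by
  induction is with
  | nil => simp [pvLoop1]
  | cons first t ih =>
    simp only [pvLoop1]
    by_cases h : pvLoop2 first js ks points <;> simp [h, ih]

theorem portA_eq_true (p_y : List Int) (points : List (List Int)) :
    choose_3_and_delete_row p_y points = true ↔
      ∃ a ∈ p_y, ∃ b ∈ p_y, ∃ c ∈ p_y, ∃ pt ∈ points,
        pvY pt ≠ a ∧ pvY pt ≠ b ∧ pvY pt ≠ c := by
  simp only [choose_3_and_delete_row, pvLoop1_eq_true, pvLoop2_eq_true, pvLoop3_eq_true]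

theorem portB_eq_true (p_y : List Int) (points : List (List Int)) :
    choose_3_and_delete_row_alt p_y points = true ↔
      p_y ≠ [] ∧ points ≠ [] ∧
        ((∃ y ∈ p_y, y ≠ (PySem.List.pyGet? p_y 0).getD 0) ∨
         (∃ pt ∈ points, pvY pt ≠ (PySem.List.pyGet? p_y 0).getD 0)) := by
  simp only [choose_3_and_delete_row_alt]
  by_cases hp : p_y = []
  · simp [hp]
  by_cases hq : points = []
  · simp [hp, hq]
  rw [if_neg (by simp [List.isEmpty_iff, hp, hq])]
  by_cases h : p_y.any (fun y => y ≠ (PySem.List.pyGet? p_y 0).getD 0)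
  · simp only [h, if_true]
    simp only [List.any_eq_true, decide_not, Bool.not_eq_true', decide_eq_false_iff_not] at h
    simp [hp, hq, h]
  · rw [Bool.not_eq_true] at h
    rw [h, if_neg (by simp)]
    simp at h
    simp only [List.any_eq_true, decide_not, Bool.not_eq_true', decide_eq_false_iff_not]
    constructor
    · rintro ⟨pt, hpt, hne⟩
      exact ⟨hp, hq, Or.inr ⟨pt, hpt, hne⟩⟩
    · rintro ⟨-, -, ⟨y, hy, hyw⟩ | ⟨pt, hpt, hne⟩⟩
      · exact absurd (h y hy) hyw
      · exact ⟨pt, hpt, hne⟩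

-- ===== VERDICT (by name: the statement is the Claim_ definition above) =====
theorem choose_3_and_delete_row_spec : Claim_equal_choose_3_and_delete_row := by
  intro p_y points _ _
  unfold Spec_choose_3_and_delete_row
  rw [Bool.eq_iff_iff, portA_eq_true, portB_eq_true]
  constructor
  · rintro ⟨a, ha, b, hb, c, hc, pt, hpt, h1, _, _⟩
    refine ⟨List.ne_nil_of_mem ha, List.ne_nil_of_mem hpt, ?_⟩
    set w := (PySem.List.pyGet? p_y 0).getD 0 with hw
    by_cases haw : a = w
    · right; exact ⟨pt, hpt, haw ▸ h1⟩
    · left; exact ⟨a, ha, haw⟩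
  · rintro ⟨hp, hq, hcase⟩
    have hw : (PySem.List.pyGet? p_y 0).getD 0 ∈ p_y := by
      cases p_y with
      | nil => exact absurd rfl hp
      | cons x xs => simp
    set w := (PySem.List.pyGet? p_y 0).getD 0 with hwdef
    rcases hcase with ⟨y, hy, hyw⟩ | ⟨pt, hpt, hptw⟩
    · rcases List.exists_mem_of_ne_nil _ hq with ⟨pt, hpt⟩
      by_cases hpw : pvY pt = w
      · exact ⟨y, hy, y, hy, y, hy, pt, hpt, by rw [hpw]; exact fun h => hyw h.symm,
          by rw [hpw]; exact fun h => hyw h.symm, by rw [hpw]; exact fun h => hyw h.symm⟩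
      · exact ⟨w, hw, w, hw, w, hw, pt, hpt, hpw, hpw, hpw⟩
    · exact ⟨w, hw, w, hw, w, hw, pt, hpt, hptw, hptw, hptw⟩
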